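-- pv_equiv track=rewrite | github.com/Bobcatsoap/jy-server | cell/RoomType13Calculator.py | is_plane
-- ===== SOURCE A (Python) =====
-- def is_plane(cards, three_and_dai_count, three_cards=None):
--     if 3 > three_and_dai_count > 5:
--         return False
--     # 查看牌数量是否合适
--     count = len(cards) % three_and_dai_count
--     if count > 0:
--         return False
--     plane_count = len(cards) // three_and_dai_count
--     if plane_count < 2:
--         return False
--
--     # 找顺子个数
--     card_list = []
--     for k in cards:
--         if cards.count(k) >= 3 and k not in card_list:
--             card_list.append(k)
--     if len(card_list) < plane_count:
--         return False
--
--     def get_continues_count(distinct_cards, v):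
--         # 取V开始的顺子长度
--         _count = 0
--         card_len = len(distinct_cards)
--         for i in range(card_len):
--             if v in distinct_cards:
--                 v += 1
--                 _count += 1
--                 continue
--             break
--         return _count
--
--     def get_max_continues_count(distinct_cards):
--         # 查从几开始顺子最长
--         _max_count = 0
--         max_v = 0
--         for v in distinct_cards:
--             tmp_count = get_continues_count(distinct_cards, v)
--             if tmp_count >= _max_count:
--                 _max_count = tmp_count
--                 max_v = v
--         return _max_count, max_v
--
--     # 取最大连续个数
--     max_count, start_val = get_max_continues_count(card_list)
--     if max_count < plane_count:
--         return False
--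
--     # 组织返回3张的值
--     if three_cards is not None:
--         if max_count > plane_count:
--             start_val += (max_count - plane_count)
--         for i in range(plane_count):
--             three_cards.append(start_val + i)
--     return True
-- ===== SOURCE B (Python) =====
-- def is_plane(cards, three_and_dai_count, three_cards=None):
--     n = len(cards)
--     if three_and_dai_count <= 0 or n % three_and_dai_count != 0:
--         return False
--     plane_count = n // three_and_dai_count
--     if plane_count < 2:
--         return False
--     # one-pass counter; triple values in first-appearance order
--     cnt = {}
--     for k in cards:
--         cnt[k] = cnt.get(k, 0) + 1
--     triples = [v for v, c in cnt.items() if c >= 3]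
--     if len(triples) < plane_count:
--         return False
--     tset = set(triples)
--     best = 0
--     start = 0
--     for v in triples:
--         if v - 1 in tset:
--             continue  # not a run start; covered by its run's start
--         length = 1
--         while v + length in tset:
--             length += 1
--         if length >= best:
--             best = length
--             start = v
--     if best < plane_count:
--         return False
--     if three_cards is not None:
--         start += best - plane_count
--         for i in range(plane_count):
--             three_cards.append(start + i)
--     return True
-- ===== Notes on version B (the rewrite author's own statement) =====
-- stated objective: alternative
-- what changed: Replaces the quadratic cards.count scan by a single-pass count dict, the list-membership run probing by set membership, and scans run lengths only from run starts (values v with v-1 absent), preserving A's first-appearance order and last-max tie-break.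
import Mathlib
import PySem

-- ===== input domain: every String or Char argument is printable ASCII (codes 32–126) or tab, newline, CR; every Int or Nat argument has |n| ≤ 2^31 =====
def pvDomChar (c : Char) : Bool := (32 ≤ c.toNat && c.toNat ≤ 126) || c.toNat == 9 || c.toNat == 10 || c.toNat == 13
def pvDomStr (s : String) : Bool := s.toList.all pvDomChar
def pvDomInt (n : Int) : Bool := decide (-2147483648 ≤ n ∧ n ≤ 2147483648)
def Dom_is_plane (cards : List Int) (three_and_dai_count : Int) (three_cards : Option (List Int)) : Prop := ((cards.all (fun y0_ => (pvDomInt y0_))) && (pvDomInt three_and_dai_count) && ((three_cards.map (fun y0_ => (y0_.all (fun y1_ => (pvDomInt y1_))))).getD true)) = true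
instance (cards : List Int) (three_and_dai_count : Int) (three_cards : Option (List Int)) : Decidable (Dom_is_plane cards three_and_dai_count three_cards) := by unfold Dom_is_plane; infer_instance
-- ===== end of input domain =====

-- B replaces A's repeated cards.count scan and its nested run search by one counting pass,
-- set membership and a run-start scan. The equivalence proved is about the RETURN value;
-- both versions also append the same values to three_cards.

-- ===== PORT A =====
-- get_continues_count: 'for i in range(card_len): if v in dc: v += 1; count += 1; else: break'
-- ported as fuel recursion with fuel = card_len (the range bound).
def pvContA (dc : List Int) : Nat → Int → Int
  | 0, _ => 0
  | f + 1, v => if v ∈ dc then 1 + pvContA dc f (v + 1) else 0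

def pvGetCont (dc : List Int) (v : Int) : Int := pvContA dc dc.length v

-- get_max_continues_count: running (max_count, max_v) with '>=' update
def pvGetMax (dc : List Int) : Int × Int :=
  dc.foldl (fun s v =>
    let t := pvGetCont dc v
    if t ≥ s.1 then (t, v) else s) ((0 : Int), (0 : Int))

-- the final 'if three_cards is not None' block only mutates three_cards; the returned value is True.
def is_plane (cards : List Int) (three_and_dai_count : Int) (three_cards : Option (List Int)) : Bool :=
  if 3 > three_and_dai_count ∧ three_and_dai_count > 5 then false
  else
    let n : Int := cards.length
    let count := PySem.Int.mod n three_and_dai_count   -- raises iff divisor = 0: excluded by Pre_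
    if count > 0 then false
    else
      let plane_count := PySem.Int.floordiv n three_and_dai_count
      if plane_count < 2 then false
      else
        let card_list := cards.foldl
          (fun acc k => if (cards.count k : Int) ≥ 3 ∧ k ∉ acc then acc ++ [k] else acc) []
        if (card_list.length : Int) < plane_count then false
        else
          let mc := (pvGetMax card_list).1
          if mc < plane_count then false
          else true

-- ===== PORT B =====
-- 'length = 1; while v + length in tset: length += 1' — fuel recursion; fuel = |tset| is
-- enough: the probed values v+1, …, v+length are distinct members of tset.
def pvWalk (tset : List Int) : Nat → Int → Int → Int
  | 0, _, len => len
  | f + 1, v, len => if (v + len) ∈ tset then pvWalk tset f v (len + 1) else len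

-- the final 'if three_cards is not None' block only mutates three_cards; the returned value is True.
def is_plane_alt (cards : List Int) (three_and_dai_count : Int) (three_cards : Option (List Int)) : Bool :=
  let n : Int := cards.length
  if three_and_dai_count ≤ 0 ∨ PySem.Int.mod n three_and_dai_count ≠ 0 then false
  else
    let plane_count := PySem.Int.floordiv n three_and_dai_count
    if plane_count < 2 then false
    else
      let cnt := cards.foldl (fun d k => d.modify k 0 (· + 1)) (PySem.Dict.empty (κ := Int) (ν := Int))
      let triples := (cnt.items.filter (fun p => p.2 ≥ 3)).map (·.1)
      if (triples.length : Int) < plane_count then false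
      else
        let tset : PySem.Set Int := PySem.Set.ofList triples
        let best := triples.foldl (fun s v =>
          if (v - 1) ∈ tset then s
          else
            let len := pvWalk tset tset.length v 1
            if len ≥ s.1 then (len, v) else s) ((0 : Int), (0 : Int))
        if best.1 < plane_count then false
        else true

-- ===== PRECONDITION & SPEC =====
-- A raises ZeroDivisionError exactly when three_and_dai_count = 0 (len(cards) % 0).
def Pre_is_plane (cards : List Int) (three_and_dai_count : Int) (three_cards : Option (List Int)) : Prop :=
  three_and_dai_count ≠ 0
instance (cards : List Int) (three_and_dai_count : Int) (three_cards : Option (List Int)) : Decidable (Pre_is_plane cards three_and_dai_count three_cards) := by unfold Pre_is_plane; infer_instance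

def pvWitness_is_plane : List Int × Int × Option (List Int) := ([3, 3, 3, 4, 4, 4], 3, none)

def Spec_is_plane (cards : List Int) (three_and_dai_count : Int) (three_cards : Option (List Int)) (out : Bool) : Prop := out = is_plane_alt cards three_and_dai_count three_cards
instance (cards : List Int) (three_and_dai_count : Int) (three_cards : Option (List Int)) (out : Bool) : Decidable (Spec_is_plane cards three_and_dai_count three_cards out) := by unfold Spec_is_plane; infer_instance

-- ===== CLAIM (what is proved, stated in full; the proofs are below) =====
def Claim_equal_is_plane : Prop := ∀ (cards : List Int) (three_and_dai_count : Int) (three_cards : Option (List Int)), Dom_is_plane cards three_and_dai_count three_cards → Pre_is_plane cards three_and_dai_count three_cards → Spec_is_plane cards three_and_dai_count three_cards (is_plane cards three_and_dai_count three_cards)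

-- ===== LEMMAS AND PROOFS =====

theorem pvContA_succ (L : List Int) (f : Nat) (v : Int) :
    pvContA L (f + 1) v = if v ∈ L then 1 + pvContA L f (v + 1) else 0 := rfl

-- the while loop measured from len equals len plus A's counting loop from v+len
theorem pv_walk_eq (S : List Int) (f : Nat) (v len : Int) :
    pvWalk S f v len = len + pvContA S f (v + len) := by
  induction f generalizing len with
  | zero => simp [pvWalk, pvContA]
  | succ f ih =>
    rw [pvWalk, pvContA_succ]
    by_cases h : (v + len) ∈ S
    · rw [if_pos h, if_pos h, ih (len + 1), show v + (len + 1) = v + len + 1 by ring]; ring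
    · rw [if_neg h, if_neg h]; ring

-- if one more unit of fuel changes the count, the whole chain v, v+1, …, v+f is in the list
theorem pv_contA_chain (L : List Int) (f : Nat) (v : Int)
    (h : pvContA L (f + 1) v ≠ pvContA L f v) : ∀ i : Nat, i ≤ f → (v + i) ∈ L := by
  induction f generalizing v with
  | zero =>
    intro i hi
    interval_cases i
    by_cases hv : v ∈ L
    · simpa using hv
    · rw [pvContA_succ, if_neg hv] at h; simp [pvContA] at h
  | succ f ih =>
    intro i hi
    by_cases hv : v ∈ L
    · rcases Nat.eq_zero_or_pos i with rfl | hip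
      · simpa using hv
      · have h' : pvContA L (f + 1) (v + 1) ≠ pvContA L f (v + 1) := by
          rw [pvContA_succ L (f + 1) v, pvContA_succ L f v, if_pos hv, if_pos hv] at h; omega
        have hm := ih (v + 1) h' (i - 1) (by omega)
        rw [show v + (i : Int) = v + 1 + ((i - 1 : Nat) : Int) from by omega]
        exact hm
    · rw [pvContA_succ L (f + 1) v, pvContA_succ L f v, if_neg hv, if_neg hv] at h
      exact absurd rfl h

-- at full fuel the count from a member of L unfolds one step at the SAME fuel
theorem pv_contA_step (L : List Int) (v : Int) (hv : v ∈ L) :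
    pvContA L L.length v = 1 + pvContA L L.length (v + 1) := by
  obtain ⟨m, hm⟩ : ∃ m, L.length = m + 1 :=
    ⟨L.length - 1, by have := List.length_pos_of_mem hv; omega⟩
  rw [hm, pvContA_succ, if_pos hv]
  congr 1
  by_cases hne : pvContA L (m + 1) (v + 1) = pvContA L m (v + 1)
  · exact hne.symm
  · exfalso
    have hchain := pv_contA_chain L m (v + 1) hne
    set C : List Int := v :: (List.range (m + 1)).map (fun i : Nat => v + 1 + (i : Int)) with hC
    have hsub : C ⊆ L := by
      intro x hx
      rcases List.mem_cons.mp hx with rfl | hx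
      · exact hv
      · obtain ⟨i, hi, rfl⟩ := List.mem_map.mp hx
        exact hchain i (Nat.lt_succ_iff.mp (List.mem_range.mp hi))
    have hnodupC : C.Nodup := by
      refine List.nodup_cons.mpr ⟨?_, ?_⟩
      · intro hmem
        obtain ⟨i, _, he⟩ := List.mem_map.mp hmem
        omega
      · exact List.Nodup.map (fun a b h => by omega) List.nodup_range
    have := (List.subperm_of_subset hnodupC hsub).length_le
    simp [hC, hm] at this

-- the first component of the (count, value) fold is a running max
theorem pv_fold_fst_max (L : List Int) (f : Int → Int) (s : Int × Int) :
    (L.foldl (fun s v => if f v ≥ s.1 then (f v, v) else s) s).1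
      = L.foldl (fun a v => max a (f v)) s.1 := by
  induction L generalizing s with
  | nil => rfl
  | cons x t ih =>
    simp only [List.foldl_cons]
    rw [ih]
    by_cases h : f x ≥ s.1
    · rw [if_pos h]; congr 1; omega
    · rw [if_neg h]; congr 1; omega

theorem pv_foldl_max_le_iff (f : Int → Int) (L : List Int) (a c : Int) :
    L.foldl (fun a v => max a (f v)) a ≤ c ↔ a ≤ c ∧ ∀ v ∈ L, f v ≤ c := by
  induction L generalizing a with
  | nil => simp
  | cons x t ih =>
    simp only [List.foldl_cons, ih, List.mem_cons]
    constructor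
    · rintro ⟨h1, h2⟩
      exact ⟨by omega, fun v hv => by rcases hv with rfl | hv; omega; exact h2 v hv⟩
    · rintro ⟨h1, h2⟩
      exact ⟨by have := h2 x (Or.inl rfl); omega, fun v hv => h2 v (Or.inr hv)⟩

-- ofList commutes with filter (the test does not look at the accumulator)
theorem pv_ofList_filter (p : Int → Bool) (l : List Int) :
    PySem.Set.ofList (l.filter p) = (PySem.Set.ofList l).filter p := by
  suffices h : ∀ acc : List Int, (l.filter p).foldl PySem.Set.add (acc.filter p)
      = (l.foldl PySem.Set.add acc).filter p by
    simpa using h []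
  induction l with
  | nil => intro acc; simp
  | cons x t ih =>
    intro acc
    by_cases hp : p x
    · rw [List.filter_cons_of_pos hp]
      simp only [List.foldl_cons]
      rw [show PySem.Set.add (acc.filter p) x = (PySem.Set.add acc x).filter p from ?_, ih]
      by_cases hm : x ∈ acc
      · simp [PySem.Set.add, hm, List.mem_filter, hp]
      · simp [PySem.Set.add, hm, List.mem_filter, hp, List.filter_append]
    · rw [List.filter_cons_of_neg (by simpa using hp)]
      simp only [List.foldl_cons]
      rw [← ih (PySem.Set.add acc x)]
      congr 1
      by_cases hm : x ∈ acc
      · simp [PySem.Set.add, hm]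
      · simp [PySem.Set.add, hm, List.filter_append, hp]

-- A's card_list in closed form: first occurrences of the values with count ≥ 3
theorem pv_cardlist_eq (cards : List Int) :
    cards.foldl (fun acc k => if (cards.count k : Int) ≥ 3 ∧ k ∉ acc then acc ++ [k] else acc) []
      = (PySem.Set.ofList cards).filter (fun k => decide ((cards.count k : Int) ≥ 3)) := by
  have hrhs : cards.foldl (fun acc k => if (cards.count k : Int) ≥ 3 ∧ k ∉ acc then acc ++ [k] else acc) []
      = cards.foldl (fun acc k => if (cards.count k : Int) ≥ 3 then PySem.Set.add acc k else acc) [] := by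
    apply PySem.List.foldl_congr_mem
    intro acc x _
    by_cases hp : (cards.count x : Int) ≥ 3
    · by_cases hm : x ∈ acc <;>
        simp [hp, hm, PySem.Set.add, PySem.Set.contains_eq_listContains]
    · simp [hp]
  rw [hrhs, PySem.List.foldl_ite_eq_foldl_filter]
  rw [show (cards.filter (fun k => decide ((cards.count k : Int) ≥ 3))).foldl PySem.Set.add []
      = PySem.Set.ofList (cards.filter (fun k => decide ((cards.count k : Int) ≥ 3))) from rfl]
  rw [pv_ofList_filter]

-- B's count dict, filtered to count ≥ 3 and projected to keys, yields exactly A's card_list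
theorem pv_triples_eq (cards : List Int) :
    (((cards.foldl (fun d k => d.modify k 0 (· + 1)) (PySem.Dict.empty (κ := Int) (ν := Int))).items.filter
        (fun p => p.2 ≥ 3)).map (·.1))
    = cards.foldl (fun acc k => if (cards.count k : Int) ≥ 3 ∧ k ∉ acc then acc ++ [k] else acc) [] := by
  have hcnt : cards.foldl (fun d k => d.modify k 0 (· + 1)) (PySem.Dict.empty (κ := Int) (ν := Int))
      = PySem.Dict.counter cards := (PySem.Dict.counter_eq_foldl cards).symm
  rw [hcnt, PySem.Dict.items_counter, List.filter_map, List.map_map, pv_cardlist_eq]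
  simp only [Function.comp_def]
  rw [List.filter_congr (fun k _ => show decide (3 ≤ ((k, (cards.count k : Int)).2)) = decide ((cards.count k : Int) ≥ 3) from by simp)]
  simp

theorem pv_exists_start_aux (L : List Int) :
    ∀ N : Nat, ∀ v ∈ L, (L.filter (fun x => decide (x < v))).length ≤ N →
      ∃ s ∈ L, (s - 1) ∉ L ∧ pvContA L L.length v ≤ pvContA L L.length s := by
  intro N
  induction N with
  | zero =>
    intro v hv hlen
    by_cases hm : (v - 1) ∈ L
    · exfalso
      have : (v - 1) ∈ L.filter (fun x => decide (x < v)) :=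
        List.mem_filter.mpr ⟨hm, by simp⟩
      have := List.length_pos_of_mem this
      omega
    · exact ⟨v, hv, hm, le_refl _⟩
  | succ N ih =>
    intro v hv hlen
    by_cases hm : (v - 1) ∈ L
    · have step := pv_contA_step L (v - 1) hm
      have hlt : (L.filter (fun x => decide (x < v - 1))).length
          < (L.filter (fun x => decide (x < v))).length := by
        have hff : (L.filter (fun x => decide (x < v))).filter (fun x => decide (x < v - 1))
            = L.filter (fun x => decide (x < v - 1)) := by
          rw [List.filter_filter]
          apply List.filter_congr
          intro x _; simp; omega
        rw [← hff, List.length_filter_lt_length_iff_exists]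
        exact ⟨v - 1, List.mem_filter.mpr ⟨hm, by simp⟩, by simp⟩
      obtain ⟨s, hs, hs1, hle⟩ := ih (v - 1) hm (by omega)
      refine ⟨s, hs, hs1, ?_⟩
      rw [show v - 1 + 1 = v by ring] at step
      omega
    · exact ⟨v, hv, hm, le_refl _⟩

-- every value's run is dominated by some run start's run
theorem pv_exists_start (L : List Int) (v : Int) (hv : v ∈ L) :
    ∃ s ∈ L, (s - 1) ∉ L ∧ pvContA L L.length v ≤ pvContA L L.length s :=
  pv_exists_start_aux L (L.filter (fun x => decide (x < v))).length v hv (le_refl _)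

-- the two running maxes agree: scanning only run starts loses nothing
theorem pv_max_eq (L : List Int) :
    (L.foldl (fun s v =>
        let t := pvGetCont L v
        if t ≥ s.1 then (t, v) else s) ((0 : Int), (0 : Int))).1
    = (L.foldl (fun s v =>
        if (v - 1) ∈ L then s
        else
          let len := pvWalk L L.length v 1
          if len ≥ s.1 then (len, v) else s) ((0 : Int), (0 : Int))).1 := by
  have hA : (L.foldl (fun s v =>
        let t := pvGetCont L v
        if t ≥ s.1 then (t, v) else s) ((0 : Int), (0 : Int))).1
      = L.foldl (fun a v => max a (pvGetCont L v)) 0 :=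
    pv_fold_fst_max L (pvGetCont L) (0, 0)
  have hcongr : L.foldl (fun s v =>
        if (v - 1) ∈ L then s
        else
          let len := pvWalk L L.length v 1
          if len ≥ s.1 then (len, v) else s) ((0 : Int), (0 : Int))
      = L.foldl (fun s v =>
        if ¬ ((v - 1) ∈ L) then (if pvGetCont L v ≥ s.1 then (pvGetCont L v, v) else s) else s)
        ((0 : Int), (0 : Int)) := by
    apply PySem.List.foldl_congr_mem
    intro acc x hx
    have hlen : pvWalk L L.length x 1 = pvGetCont L x := by
      rw [pv_walk_eq, pvGetCont, pv_contA_step L x hx]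
    simp only [hlen]
    by_cases h : (x - 1) ∈ L <;> simp [h]
  have hB : (L.foldl (fun s v =>
        if ¬ ((v - 1) ∈ L) then (if pvGetCont L v ≥ s.1 then (pvGetCont L v, v) else s) else s)
        ((0 : Int), (0 : Int)))
      = (L.filter (fun v => decide (¬ ((v - 1) ∈ L)))).foldl
          (fun s v => if pvGetCont L v ≥ s.1 then (pvGetCont L v, v) else s) ((0 : Int), (0 : Int)) :=
    PySem.List.foldl_ite_eq_foldl_filter _ _ _ _
  rw [hA, hcongr, hB, pv_fold_fst_max _ (pvGetCont L) (0, 0)]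
  rw [show ((0 : Int), (0 : Int)).1 = (0 : Int) from rfl]
  apply le_antisymm
  · rw [pv_foldl_max_le_iff]
    refine ⟨?_, ?_⟩
    · exact ((pv_foldl_max_le_iff (pvGetCont L) (L.filter (fun v => decide (¬ ((v - 1) ∈ L)))) 0 _).mp (le_refl _)).1
    · intro v hv
      obtain ⟨s, hs, hs1, hle⟩ := pv_exists_start L v hv
      have hsf : s ∈ L.filter (fun v => decide (¬ ((v - 1) ∈ L))) :=
        List.mem_filter.mpr ⟨hs, by simpa using hs1⟩
      have hall := (pv_foldl_max_le_iff (pvGetCont L) (L.filter (fun v => decide (¬ ((v - 1) ∈ L)))) 0 _).mp (le_refl _)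
      have := hall.2 s hsf
      unfold pvGetCont at *
      omega
  · rw [pv_foldl_max_le_iff]
    refine ⟨?_, ?_⟩
    · exact ((pv_foldl_max_le_iff (pvGetCont L) L 0 _).mp (le_refl _)).1
    · intro v hv
      exact ((pv_foldl_max_le_iff (pvGetCont L) L 0 _).mp (le_refl _)).2 v (List.mem_filter.mp hv).1

-- ===== VERDICT (by name: the statement is the Claim_ definition above) =====
theorem is_plane_spec : Claim_equal_is_plane := by
  intro cards t tc _hdom hpre
  unfold Spec_is_plane
  have hpre' : t ≠ 0 := hpre
  simp only [is_plane, is_plane_alt]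
  rcases lt_trichotomy t 0 with ht | ht | ht
  · -- t < 0: A falls through to plane_count < 2, B takes its first branch
    have hmb := PySem.Int.mod_neg_bounds (a := (cards.length : Int)) ht
    have hfd : PySem.Int.floordiv (cards.length : Int) t ≤ 0 := by
      have h := PySem.Int.floordiv_mul_add_mod (cards.length : Int) t
      by_contra hc
      rw [not_le] at hc
      nlinarith [hmb.2, Int.natCast_nonneg cards.length]
    rw [if_neg (by omega), if_neg (by omega), if_pos (by omega), if_pos (Or.inl (by omega))]
  · exact absurd ht hpre'
  · -- t > 0
    rw [if_neg (by omega)]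
    by_cases hmd : PySem.Int.mod (cards.length : Int) t = 0
    · rw [if_neg (show ¬ PySem.Int.mod (cards.length : Int) t > 0 from by omega),
        if_neg (show ¬ (t ≤ 0 ∨ PySem.Int.mod (cards.length : Int) t ≠ 0) from by
          rintro (h | h) <;> omega)]
      by_cases hpc : PySem.Int.floordiv (cards.length : Int) t < 2
      · rw [if_pos hpc, if_pos hpc]
      · rw [if_neg hpc, if_neg hpc, pv_triples_eq, pv_cardlist_eq]
        set F : List Int := (PySem.Set.ofList cards).filter (fun k => decide ((cards.count k : Int) ≥ 3)) with hF
        have hnodup : F.Nodup := (PySem.Set.nodup_ofList cards).filter _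
        rw [PySem.Set.ofList_eq_self_of_nodup F hnodup]
        by_cases hlf : (F.length : Int) < PySem.Int.floordiv (cards.length : Int) t
        · rw [if_pos hlf, if_pos hlf]
        · rw [if_neg hlf, if_neg hlf, pvGetMax, pv_max_eq]
    · have hge := PySem.Int.mod_nonneg (a := (cards.length : Int)) ht
      rw [if_pos (by omega), if_pos (Or.inr hmd)]
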